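-- pv_equiv track=rewrite | github.com/PyAgni/CompetitiveProgramming | LadderDiv2-A/aa.py | solution
-- ===== SOURCE A (Python) =====
-- def solution(x, y):
--     # Your code here
--     i,j,k = [0,0,0]
--     x.sort()
--     y.sort()
--     while(i<len(x) and j<len(y)):
--         if(x[i]<y[j]):
--             return x[i]
--             i+=1
--             k+=1
--         elif(y[j]<x[i]):
--             return y[j]
--             k+=1
--             j+=1
--         else:
--             i+=1
--             j+=1
--     while(i<len(x)):
--         return x[i]
--         i+=1
--         k+=1
--     while(j<len(y)):
--         return y[j]
--         j+=1
--         k+=1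
-- ===== SOURCE B (Python) =====
-- def solution(x, y):
--     # Counter-based: sort in place (keeping A's side effect), count multiplicities,
--     # and return the smallest value whose multiplicity differs between x and y.
--     x.sort()
--     y.sort()
--     cx = {}
--     for v in x:
--         cx[v] = cx.get(v, 0) + 1
--     cy = {}
--     for v in y:
--         cy[v] = cy.get(v, 0) + 1
--     for v in sorted(set(cx) | set(cy)):
--         if cx.get(v, 0) != cy.get(v, 0):
--             return v
--     return None
-- ===== Notes on version B (the rewrite author's own statement) =====
-- stated objective: alternative
-- what changed: Replaces A's two-pointer merge over the two sorted lists with frequency dictionaries plus a scan over the sorted union of keys, returning the first key whose counts differ.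
import Mathlib
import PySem

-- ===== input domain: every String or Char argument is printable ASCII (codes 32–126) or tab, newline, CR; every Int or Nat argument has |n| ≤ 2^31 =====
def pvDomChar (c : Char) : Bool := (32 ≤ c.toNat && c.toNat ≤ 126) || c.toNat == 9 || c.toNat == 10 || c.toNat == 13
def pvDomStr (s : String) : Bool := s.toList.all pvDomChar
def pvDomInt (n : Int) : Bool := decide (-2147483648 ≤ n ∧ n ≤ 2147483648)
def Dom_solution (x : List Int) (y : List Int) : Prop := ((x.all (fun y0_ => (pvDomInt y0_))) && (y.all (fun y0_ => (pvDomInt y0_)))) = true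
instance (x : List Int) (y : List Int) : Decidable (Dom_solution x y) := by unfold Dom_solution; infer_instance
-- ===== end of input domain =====

-- B replaces A's two-pointer merge of the two sorted lists by frequency dictionaries plus a
-- scan of the sorted union of keys (same cost, different data structure); both A and B sort
-- x and y in place — the theorems here are about the return value only.


-- ===== PORT A =====
-- A's while-loop over indices i, j into the two sorted lists, transcribed as structural
-- recursion on the suffixes x[i:], y[j:] (branches in A's order; the two trailing
-- while-loops of A are the last two non-empty cases, which return immediately as A does).
def solutionGo : List Int → List Int → Option Int
  | a :: s, b :: t =>
      if a < b then some a
      else if b < a then some b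
      else solutionGo s t
  | a :: _, [] => some a
  | [], b :: _ => some b
  | [], [] => none

def solution (x : List Int) (y : List Int) : Option Int :=
  solutionGo (PySem.List.sorted x (fun v => v) false) (PySem.List.sorted y (fun v => v) false)

-- ===== PORT B =====
def solution_alt (x : List Int) (y : List Int) : Option Int :=
  let sx := PySem.List.sorted x (fun v => v) false
  let sy := PySem.List.sorted y (fun v => v) false
  let cx : PySem.Dict Int Int := sx.foldl (fun d v => d.insert v (d.getD v 0 + 1)) PySem.Dict.empty
  let cy : PySem.Dict Int Int := sy.foldl (fun d v => d.insert v (d.getD v 0 + 1)) PySem.Dict.empty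
  (PySem.List.sorted (PySem.Set.union (PySem.Set.ofList cx.keys) cy.keys) (fun v => v) false).find?
    (fun v => decide (cx.getD v 0 ≠ cy.getD v 0))

-- ===== PRECONDITION & SPEC =====
def Spec_solution (x : List Int) (y : List Int) (out : Option Int) : Prop := out = solution_alt x y
instance (x : List Int) (y : List Int) (out : Option Int) : Decidable (Spec_solution x y out) := by unfold Spec_solution; infer_instance

-- ===== CLAIM (what is proved, stated in full; the proofs are below) =====
def Claim_equal_solution : Prop := ∀ (x : List Int) (y : List Int), Dom_solution x y → Spec_solution x y (solution x y)

-- ===== LEMMAS AND PROOFS =====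

-- the head of a ≤-sorted list bounds every member
theorem head_le_of_sorted {a v : Int} {s : List Int}
    (hs : (a :: s).Pairwise (fun p q => p ≤ q)) (hv : v ∈ a :: s) : a ≤ v := by
  rcases List.mem_cons.mp hv with rfl | hv'
  · exact le_refl v
  · exact List.rel_of_pairwise_cons hs hv'

-- If A's merge returns none, the two multisets have equal counts everywhere.
theorem solutionGo_none : ∀ (s t : List Int), solutionGo s t = none →
    ∀ v : Int, s.count v = t.count v := by
  intro s
  induction s with
  | nil =>
    intro t h v
    cases t with
    | nil => simp
    | cons b t' => simp [solutionGo] at h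
  | cons a s' ih =>
    intro t h v
    cases t with
    | nil => simp [solutionGo] at h
    | cons b t' =>
      simp only [solutionGo] at h
      split_ifs at h with h1 h2
      have hab : a = b := le_antisymm (not_lt.mp h2) (not_lt.mp h1)
      subst hab
      simp [List.count_cons, ih t' h v]

-- If A's merge on two sorted lists returns some m, then m occurs in one of the lists,
-- its counts differ, and m is minimal among the values whose counts differ.
theorem solutionGo_some : ∀ (s t : List Int) (m : Int),
    s.Pairwise (fun p q => p ≤ q) → t.Pairwise (fun p q => p ≤ q) →
    solutionGo s t = some m →
    (m ∈ s ∨ m ∈ t) ∧ s.count m ≠ t.count m ∧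
      ∀ v : Int, s.count v ≠ t.count v → m ≤ v := by
  intro s
  induction s with
  | nil =>
    intro t m _ ht h
    cases t with
    | nil => simp [solutionGo] at h
    | cons b t' =>
      simp only [solutionGo, Option.some.injEq] at h
      subst h
      refine ⟨Or.inr List.mem_cons_self, by simp [List.count_cons_self], ?_⟩
      intro v hv
      simp only [List.count_nil] at hv
      have hvmem : v ∈ b :: t' := by
        by_contra hvm
        exact hv (by simp [List.count_eq_zero_of_not_mem hvm])
      exact head_le_of_sorted ht hvmem
  | cons a s' ih =>
    intro t m hs ht h
    cases t with
    | nil =>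
      simp only [solutionGo, Option.some.injEq] at h
      subst h
      refine ⟨Or.inl List.mem_cons_self, by simp [List.count_cons_self], ?_⟩
      intro v hv
      simp only [List.count_nil] at hv
      have hvmem : v ∈ a :: s' := by
        by_contra hvm
        exact hv (by simp [List.count_eq_zero_of_not_mem hvm])
      exact head_le_of_sorted hs hvmem
    | cons b t' =>
      simp only [solutionGo] at h
      split_ifs at h with h1 h2
      · -- a < b : A returns a
        injection h with h; subst h
        have hmt : a ∉ b :: t' := fun hmem =>
          absurd (head_le_of_sorted ht hmem) (not_le.mpr h1)
        refine ⟨Or.inl List.mem_cons_self, ?_, ?_⟩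
        · have h0 : List.count a (b :: t') = 0 := List.count_eq_zero_of_not_mem hmt
          simp only [List.count_cons_self, h0]
          omega
        · intro v hv
          have hvmem : v ∈ a :: s' ∨ v ∈ b :: t' := by
            by_contra hvm
            obtain ⟨hv1, hv2⟩ := not_or.mp hvm
            exact hv (by simp [List.count_eq_zero_of_not_mem hv1,
              List.count_eq_zero_of_not_mem hv2])
          rcases hvmem with hvs | hvt
          · exact head_le_of_sorted hs hvs
          · exact le_of_lt (lt_of_lt_of_le h1 (head_le_of_sorted ht hvt))
      · -- b < a : A returns b
        injection h with h; subst h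
        have hms : b ∉ a :: s' := fun hmem =>
          absurd (head_le_of_sorted hs hmem) (not_le.mpr h2)
        refine ⟨Or.inr List.mem_cons_self, ?_, ?_⟩
        · have h0 : List.count b (a :: s') = 0 := List.count_eq_zero_of_not_mem hms
          simp only [List.count_cons_self, h0]
          omega
        · intro v hv
          have hvmem : v ∈ a :: s' ∨ v ∈ b :: t' := by
            by_contra hvm
            obtain ⟨hv1, hv2⟩ := not_or.mp hvm
            exact hv (by simp [List.count_eq_zero_of_not_mem hv1,
              List.count_eq_zero_of_not_mem hv2])
          rcases hvmem with hvs | hvt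
          · exact le_of_lt (lt_of_lt_of_le h2 (head_le_of_sorted hs hvs))
          · exact head_le_of_sorted ht hvt
      · -- a = b : A recurses
        have hab : a = b := le_antisymm (not_lt.mp h2) (not_lt.mp h1)
        subst hab
        obtain ⟨hmem, hne, hmin⟩ := ih t' m hs.of_cons ht.of_cons h
        refine ⟨?_, ?_, ?_⟩
        · rcases hmem with hm | hm
          · exact Or.inl (List.mem_cons_of_mem a hm)
          · exact Or.inr (List.mem_cons_of_mem a hm)
        · simp only [List.count_cons]
          split_ifs <;> omega
        · intro v hv
          apply hmin
          intro heq
          exact hv (by simp [List.count_cons, heq])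

-- find? on a strictly increasing list returns the minimal satisfying member
theorem find?_eq_some_of_min : ∀ (l : List Int) (p : Int → Bool) (m : Int),
    l.Pairwise (fun a b => a < b) → m ∈ l → p m = true →
    (∀ v ∈ l, p v = true → m ≤ v) → l.find? p = some m := by
  intro l
  induction l with
  | nil => intro p m _ hm; exact absurd hm (List.not_mem_nil)
  | cons h tl ih =>
    intro p m hp hm hpm hmin
    rcases List.mem_cons.mp hm with rfl | hm'
    · simp [List.find?, hpm]
    · have hlt : h < m := List.rel_of_pairwise_cons hp hm'
      have hph : p h = false := by
        cases hh : p h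
        · rfl
        · exact absurd (hmin h List.mem_cons_self hh) (not_le.mpr hlt)
      simp only [List.find?, hph]
      exact ih p m hp.of_cons hm' hpm
        (fun v hv hpv => hmin v (List.mem_cons_of_mem h hv) hpv)

-- B's key list is sorted(set(sx) | set(sy)): membership and strict increase
theorem solution_eq_alt (x y : List Int) : solution x y = solution_alt x y := by
  unfold solution solution_alt
  simp only [PySem.Dict.foldl_insert_getD_add_one_eq_counter]
  set sx := PySem.List.sorted x (fun v => v) false with hsx
  set sy := PySem.List.sorted y (fun v => v) false with hsy
  have hsortx : sx.Pairwise (fun p q => p ≤ q) := PySem.List.sorted_pairwise x _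
  have hsorty : sy.Pairwise (fun p q => p ≤ q) := PySem.List.sorted_pairwise y _
  set u : List Int := PySem.Set.union (PySem.Set.ofList (PySem.Dict.counter sx).keys)
      (PySem.Dict.counter sy).keys with hu
  set l : List Int := PySem.List.sorted u (fun v => v) false with hl
  have hmemu : ∀ v : Int, v ∈ u ↔ v ∈ sx ∨ v ∈ sy := by
    intro v
    rw [hu, PySem.Set.mem_union]
    simp [PySem.Set.mem_ofList, PySem.Dict.keys_counter, PySem.Set.mem_ofList]
  have hmeml : ∀ v : Int, v ∈ l ↔ v ∈ sx ∨ v ∈ sy := by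
    intro v; rw [hl, PySem.List.mem_sorted]; exact hmemu v
  have hnodupu : u.Nodup := by
    rw [hu]; exact PySem.Set.nodup_union _ _ (PySem.Set.nodup_ofList _)
  have hlt : l.Pairwise (fun a b => a < b) := by
    have hle : l.Pairwise (fun a b => (fun v => v) a ≤ (fun v => v) b) :=
      PySem.List.sorted_pairwise u _
    have hnodupl : l.Nodup := ((PySem.List.sorted_perm u _ _).nodup_iff).mpr hnodupu
    exact List.Pairwise.imp₂ (fun a b hab hne => lt_of_le_of_ne hab hne) hle hnodupl
  have hpred : ∀ v : Int,
      (decide ((PySem.Dict.counter sx).getD v 0 ≠ (PySem.Dict.counter sy).getD v 0)) =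
        decide (sx.count v ≠ sy.count v) := by
    intro v
    simp [PySem.Dict.getD_counter]
  cases hgo : solutionGo sx sy with
  | none =>
    have hcnt := solutionGo_none sx sy hgo
    symm
    rw [List.find?_eq_none]
    intro v _
    simp [PySem.Dict.getD_counter, hcnt v]
  | some m =>
    obtain ⟨hmem, hne, hmin⟩ := solutionGo_some sx sy m hsortx hsorty hgo
    symm
    apply find?_eq_some_of_min l _ m hlt
    · exact (hmeml m).mpr (by tauto)
    · simp [PySem.Dict.getD_counter, hne]
    · intro v _ hpv
      apply hmin
      simpa [PySem.Dict.getD_counter] using hpv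

-- ===== VERDICT (by name: the statement is the Claim_ definition above) =====
theorem solution_spec : Claim_equal_solution := by
  unfold Claim_equal_solution Spec_solution
  intro x y _
  exact solution_eq_alt x y
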